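-- pv_equiv track=rewrite | github.com/wreis/find_subsequence | find_subsequence.py | _find_highest_sum
-- ===== SOURCE A (Python) =====
-- from itertools import islice
--
-- def _find_highest_sum(sequence, length):
--     """Implements logic for base/original task (values option)"""
--
--     highest_sum = []
--     for i in range(2, length+1):
--         subsequences = list(
--             sum(
--                 map(lambda x: x, islice(sequence, j, i+j))
--             ) for j in range(0, len(sequence)-1)
--         )
--         highest_sum.append( max(subsequences) )
--     return max(highest_sum)
-- ===== SOURCE B (Python) =====
-- def _find_highest_sum(sequence, length):
--     seq = list(sequence)
--     n = len(seq)
--     pref = [0]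
--     for x in seq:
--         pref.append(pref[-1] + x)
--     best = pref[2]
--     for i in range(2, length + 1):
--         for j in range(n - 1):
--             s = pref[min(i + j, n)] - pref[j]
--             if s > best:
--                 best = s
--     return best
-- ===== Notes on version B (the rewrite author's own statement) =====
-- stated objective: faster
-- what changed: Replaces recomputing every window's sum from scratch (an inner summation pass per window, per window size) with a prefix-sum array built once, so each window sum is one O(1) subtraction tracked by a running maximum instead of per-size lists fed to max().
import Mathlib
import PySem

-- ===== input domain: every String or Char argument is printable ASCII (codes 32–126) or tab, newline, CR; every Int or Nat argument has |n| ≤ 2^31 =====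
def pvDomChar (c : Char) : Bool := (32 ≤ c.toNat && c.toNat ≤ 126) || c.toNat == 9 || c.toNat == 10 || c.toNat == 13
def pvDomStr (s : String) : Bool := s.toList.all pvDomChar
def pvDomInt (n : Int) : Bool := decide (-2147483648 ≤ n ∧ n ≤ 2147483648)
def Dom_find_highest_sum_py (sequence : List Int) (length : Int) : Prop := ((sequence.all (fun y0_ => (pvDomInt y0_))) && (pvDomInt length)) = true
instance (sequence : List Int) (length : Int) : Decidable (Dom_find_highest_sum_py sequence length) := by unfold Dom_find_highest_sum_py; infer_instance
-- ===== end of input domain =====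

-- B replaces A's per-window re-summation with a prefix-sum array and a running maximum
-- (each window sum becomes one subtraction); equivalence is proved on Pre_ (where A returns).

-- ===== PORT A =====
-- map(lambda x: x, islice(sequence, j, i+j)) is the identity over sequence[j:i+j]; for the
-- nonnegative bounds j and i+j occurring here, islice of a list equals the clamped slice.
-- Python's max(...) raises ValueError on an empty list; the `.getD 0` below is reached exactly
-- on such inputs, which Pre_ excludes.
def find_highest_sum_py (sequence : List Int) (length : Int) : Int :=
  let highest_sum :=
    (PySem.List.pyRange 2 (length + 1) 1).foldl
      (fun highest_sum i =>
        let subsequences :=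
          (PySem.List.pyRange 0 ((sequence.length : Int) - 1) 1).map
            (fun j => (PySem.List.slice sequence (some j) (some (i + j))).sum)
        highest_sum ++ [(PySem.List.max? subsequences (fun x => x)).getD 0])
      []
  (PySem.List.max? highest_sum (fun x => x)).getD 0

-- ===== PORT B =====
-- pref[-1] is the last element of the (never empty) prefix list; pref[2] raises IndexError in
-- Python when the sequence has fewer than 2 elements — `.getD 0` is reached exactly there,
-- which Pre_ excludes (A raises on those inputs too).
def find_highest_sum_py_alt (sequence : List Int) (length : Int) : Int :=
  let n : Int := sequence.length
  let pref := sequence.foldl (fun p x => p ++ [p.getLastD 0 + x]) [(0 : Int)]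
  let best := (PySem.List.pyGet? pref 2).getD 0
  (PySem.List.pyRange 2 (length + 1) 1).foldl
    (fun best i =>
      (PySem.List.pyRange 0 (n - 1) 1).foldl
        (fun best j =>
          let s := (PySem.List.pyGet? pref (min (i + j) n)).getD 0
                   - (PySem.List.pyGet? pref j).getD 0
          if s > best then s else best)
        best)
    best

-- ===== PRECONDITION & SPEC =====
-- Exactly the inputs on which Python A returns: with length < 2 the outer max() sees an empty
-- list, and with fewer than 2 elements every inner max() sees an empty list (ValueError).
def Pre_find_highest_sum_py (sequence : List Int) (length : Int) : Prop :=
  2 ≤ length ∧ 2 ≤ sequence.length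
instance (sequence : List Int) (length : Int) : Decidable (Pre_find_highest_sum_py sequence length) := by unfold Pre_find_highest_sum_py; infer_instance
def pvWitness_find_highest_sum_py : List Int × Int := ([3, -1, 4, 1, -5, 9], 3)

def Spec_find_highest_sum_py (sequence : List Int) (length : Int) (out : Int) : Prop := out = find_highest_sum_py_alt sequence length
instance (sequence : List Int) (length : Int) (out : Int) : Decidable (Spec_find_highest_sum_py sequence length out) := by unfold Spec_find_highest_sum_py; infer_instance

-- ===== CLAIM (what is proved, stated in full; the proofs are below) =====
def Claim_equal_find_highest_sum_py : Prop := ∀ (sequence : List Int) (length : Int), Dom_find_highest_sum_py sequence length → Pre_find_highest_sum_py sequence length → Spec_find_highest_sum_py sequence length (find_highest_sum_py sequence length)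

-- ===== LEMMAS AND PROOFS =====

-- the sum of the window of size i starting at j (shared vocabulary of the two proofs)
def pvW (sequence : List Int) (i j : Int) : Int :=
  (PySem.List.slice sequence (some j) (some (i + j))).sum
theorem pvW_eq (sequence : List Int) (i j : Int) :
    pvW sequence i j = (PySem.List.slice sequence (some j) (some (i + j))).sum := rfl

-- the running maximum over the windows of size i (A's max(subsequences) for size i)
def pvRm (sequence : List Int) (i : Int) : Int :=
  (PySem.List.pyRange 1 ((sequence.length : Int) - 1) 1).foldl
    (fun b j => max b (pvW sequence i j)) (pvW sequence i 0)
theorem pvRm_eq (sequence : List Int) (i : Int) :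
    pvRm sequence i = (PySem.List.pyRange 1 ((sequence.length : Int) - 1) 1).foldl
      (fun b j => max b (pvW sequence i j)) (pvW sequence i 0) := rfl

-- the common normal form of both programs
def pvE (sequence : List Int) (length : Int) : Int :=
  (PySem.List.pyRange 3 (length + 1) 1).foldl
    (fun b i => max b (pvRm sequence i)) (pvRm sequence 2)

-- B's prefix loop builds the scanl of partial sums.
theorem pv_build_pref (xs acc : List Int) (a : Int) :
    xs.foldl (fun p x => p ++ [p.getLastD 0 + x]) (acc ++ [a])
      = acc ++ List.scanl (· + ·) a xs := by
  induction xs generalizing acc a with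
  | nil => simp
  | cons x xs ih =>
    rw [List.foldl_cons, List.scanl_cons]
    have h1 : (acc ++ [a]).getLastD 0 = a := by simp
    rw [h1, ih (acc ++ [a]) (a + x)]
    simp

-- indexing into the scanl of partial sums
theorem pv_scanl_get (xs : List Int) (a : Int) (k : Nat) (hk : k ≤ xs.length) :
    (List.scanl (· + ·) a xs)[k]? = some (a + (xs.take k).sum) := by
  induction xs generalizing a k with
  | nil =>
    have : k = 0 := by simpa using hk
    subst this; simp
  | cons x xs ih =>
    cases k with
    | zero => simp
    | succ k =>
      rw [List.scanl_cons, List.getElem?_cons_succ, ih (a + x) k (by simpa using hk)]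
      simp [add_assoc]

-- a strict-compare update step is a max step
theorem pv_if_gt_eq_max (b s : Int) : (if s > b then s else b) = max b s := by
  rw [max_def]; split <;> split <;> omega

-- pull the initial accumulator out of a running-max fold
theorem pv_foldl_max_pull (l : List Int) (g : Int → Int) :
    ∀ (b h : Int), l.foldl (fun b j => max b (g j)) (max b h)
      = max b (l.foldl (fun b j => max b (g j)) h) := by
  induction l with
  | nil => intro b h; rfl
  | cons x t ih =>
    intro b h
    simp only [List.foldl_cons]
    rw [max_assoc, ih]

-- ===== VERDICT (by name: the statement is the Claim_ definition above) =====
theorem find_highest_sum_py_spec : Claim_equal_find_highest_sum_py := by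
  intro sequence length _ hpre
  obtain ⟨hl, hn⟩ := hpre
  -- prefix-sum facts
  have hpref : sequence.foldl (fun p x => p ++ [p.getLastD 0 + x]) [(0 : Int)]
      = List.scanl (· + ·) 0 sequence := by
    simpa using pv_build_pref sequence [] 0
  have hget : ∀ k : Nat, k ≤ sequence.length →
      PySem.List.pyGet? (List.scanl (· + ·) 0 sequence) ((k : Nat) : Int)
        = some ((sequence.take k).sum) := by
    intro k hk
    rw [PySem.List.pyGet?_natCast, pv_scanl_get sequence 0 k hk]
    simp
  -- each window sum is a difference of two prefix sums
  have hwin : ∀ i j : Int, 0 ≤ i → 0 ≤ j → j < (sequence.length : Int) - 1 →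
      (PySem.List.pyGet? (List.scanl (· + ·) 0 sequence)
          (min (i + j) (sequence.length : Int))).getD 0
        - (PySem.List.pyGet? (List.scanl (· + ·) 0 sequence) j).getD 0
        = pvW sequence i j := by
    intro i j hi hj hjlt
    obtain ⟨ni, rfl⟩ := Int.eq_ofNat_of_zero_le hi
    obtain ⟨nj, rfl⟩ := Int.eq_ofNat_of_zero_le hj
    have hjn : nj ≤ sequence.length := by omega
    have hcast : min ((ni : Int) + (nj : Int)) ((sequence.length : Int))
        = ((min (ni + nj) sequence.length : Nat) : Int) := by push_cast; rfl
    rw [hcast, hget _ (min_le_right _ _), hget nj hjn]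
    simp only [Option.getD_some]
    have hslice : pvW sequence (ni : Int) (nj : Int) = ((sequence.drop nj).take ni).sum := by
      rw [pvW_eq, add_comm ((ni : Int)) ((nj : Int)), PySem.List.slice_natCast_add]
    rw [hslice]
    have htake : sequence.take (min (ni + nj) sequence.length) = sequence.take (ni + nj) := by
      rcases le_total (ni + nj) sequence.length with h | h
      · rw [min_eq_left h]
      · rw [min_eq_right h, List.take_length, List.take_of_length_le h]
    rw [htake, Nat.add_comm ni nj, List.take_add, List.sum_append]
    ring
  -- range decompositions
  have hJ : PySem.List.pyRange 0 ((sequence.length : Int) - 1) 1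
      = 0 :: PySem.List.pyRange 1 ((sequence.length : Int) - 1) 1 :=
    PySem.List.pyRange_one_cons (by omega)
  have hR : PySem.List.pyRange 2 (length + 1) 1
      = 2 :: PySem.List.pyRange 3 (length + 1) 1 :=
    PySem.List.pyRange_one_cons (by omega)
  -- the first window equals the initial accumulator pref[2] of B
  have h20 : (sequence.take 2).sum = pvW sequence 2 0 := by
    rw [pvW_eq, add_zero, PySem.List.slice_zero_start,
      PySem.List.slice_to sequence (by norm_num : (0 : Int) ≤ 2)]
    rfl
  -- A's port in normal form
  have hA : find_highest_sum_py sequence length = pvE sequence length := by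
    unfold find_highest_sum_py
    simp only [← pvW_eq, PySem.List.foldl_append_singleton_eq_map, List.nil_append, hJ,
      List.map_cons, PySem.List.max?_id_cons, Option.getD_some, List.foldl_map, ← pvRm_eq]
    rw [hR, List.map_cons, PySem.List.max?_id_cons, Option.getD_some, List.foldl_map]
    rfl
  -- B's port in normal form
  have hB : find_highest_sum_py_alt sequence length = pvE sequence length := by
    unfold find_highest_sum_py_alt
    simp only [hpref]
    have h2 : PySem.List.pyGet? (List.scanl (· + ·) 0 sequence) (2 : Int)
        = some ((sequence.take 2).sum) := by exact_mod_cast hget 2 hn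
    rw [h2, Option.getD_some]
    refine (PySem.List.foldl_congr_mem _ _
      (fun b i => (PySem.List.pyRange 0 ((sequence.length : Int) - 1) 1).foldl
        (fun b j => max b (pvW sequence i j)) b) _ ?_).trans ?_
    · intro acc i hi
      obtain ⟨hi2, -⟩ := PySem.List.mem_pyRange_one.mp hi
      refine PySem.List.foldl_congr_mem _ _ _ _ ?_
      intro b j hj
      obtain ⟨hj0, hjlt⟩ := PySem.List.mem_pyRange_one.mp hj
      rw [pv_if_gt_eq_max, hwin i j (by omega) hj0 hjlt]
    · -- fold of per-size maxima
      refine (PySem.List.foldl_congr_mem _ _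
        (fun b i => max b (pvRm sequence i)) _ ?_).trans ?_
      · intro acc i _
        rw [hJ, List.foldl_cons, pv_foldl_max_pull
          (PySem.List.pyRange 1 ((sequence.length : Int) - 1) 1) (pvW sequence i) acc
          (pvW sequence i 0)]
        rfl
      · rw [hR, List.foldl_cons, h20]
        have hle : pvW sequence 2 0 ≤ pvRm sequence 2 := by
          rw [pvRm_eq, ← List.foldl_map]
          exact (PySem.List.le_foldl_max _ _).1
        rw [max_eq_right hle]
        rfl
  rw [Spec_find_highest_sum_py, hA, hB]
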